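-- pv_equiv track=rewrite | github.com/jyjww/algorithm | 프로그래머스/0/120896. 한 번만 등장한 문자/한 번만 등장한 문자.py | solution
-- ===== SOURCE A (Python) =====
-- def solution(s):
--     dic = {}
--
--     for ch in s:
--         if ch not in dic:
--             dic[ch] = 1
--         else:
--             dic[ch] += 1
--
--     ans = ''
--     min_val = min(dic.values())
--     answer = [k for k, v in dic.items() if v == min_val]
--     return "".join(sorted(answer))
-- ===== SOURCE B (Python) =====
-- def _rle(cs):
--     # run-length encoding of an already-sorted character list
--     if not cs:
--         return []
--     c = cs[0]
--     k = 1
--     while k < len(cs) and cs[k] == c: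
--         k += 1
--     return [(c, k)] + _rle(cs[k:])
--
--
-- def solution(s):
--     cs = sorted(s)
--     pairs = _rle(cs)
--     m = min(n for _, n in pairs)
--     return "".join(c for c, n in pairs if n == m)
-- ===== Notes on version B (the rewrite author's own statement) =====
-- stated objective: alternative
-- what changed: B sorts the characters first and counts by run-length encoding over the sorted list (adjacent-equal runs), so the minimum-count characters come out already in sorted order, replacing A's hash-dict counting plus final sort of the answer.
import Mathlib
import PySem

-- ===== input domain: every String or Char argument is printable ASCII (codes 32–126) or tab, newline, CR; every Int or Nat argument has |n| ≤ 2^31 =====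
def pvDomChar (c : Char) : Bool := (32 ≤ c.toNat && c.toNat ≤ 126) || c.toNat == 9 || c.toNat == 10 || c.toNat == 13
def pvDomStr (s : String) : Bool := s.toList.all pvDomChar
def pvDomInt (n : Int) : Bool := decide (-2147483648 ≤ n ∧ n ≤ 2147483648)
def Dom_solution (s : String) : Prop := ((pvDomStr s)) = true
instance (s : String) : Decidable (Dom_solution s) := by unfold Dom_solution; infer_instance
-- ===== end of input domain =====

-- B sorts the characters and counts by run-length over the sorted list instead of a dict counter;
-- the minimum-count characters then come out already sorted (objective: alternative algorithm).

-- ===== PORT A =====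
def solution (s : String) : String :=
  let dic := s.toList.foldl (fun d ch =>
      if !(d.contains ch) then d.insert ch (1 : Int)
      else d.insert ch (d.getD ch 0 + 1)) PySem.Dict.empty
  match PySem.List.min? dic.values (fun v => v) with
  | none => ""   -- min() over an empty dict raises ValueError in Python; excluded by Pre_solution
  | some minVal =>
    let answer := (dic.items.filter (fun p => p.2 == minVal)).map (·.1)
    String.ofList (PySem.List.sorted answer (fun c => c) false)

-- ===== PORT B =====
-- inner while loop of _rle: 'while k < len(cs) and cs[k] == c: k += 1', walking the tail past index k
def rleRun (c : Char) (k : Int) (rest : List Char) : Int × List Char :=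
  match rest with
  | [] => (k, [])
  | d :: tl => if d == c then rleRun c (k + 1) tl else (k, d :: tl)

-- termination measure for rle (the remainder cs[k:] is a suffix of the tail)
theorem rleRun_snd_length (c : Char) (k : Int) (rest : List Char) :
    (rleRun c k rest).2.length ≤ rest.length := by
  induction rest generalizing k with
  | nil => simp [rleRun]
  | cons d tl ih =>
    by_cases hd : d == c
    · simpa [rleRun, hd] using le_trans (ih (k + 1)) (Nat.le_succ _)
    · simp [rleRun, hd]

-- _rle: run-length encoding of an already-sorted character list
def rle : List Char → List (Char × Int)
  | [] => []
  | c :: tl =>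
    let r := rleRun c 1 tl
    (c, r.1) :: rle r.2
  termination_by l => l.length
  decreasing_by
    simp only [List.length_cons]
    exact Nat.lt_succ_of_le (rleRun_snd_length c 1 tl)

def solution_alt (s : String) : String :=
  let cs := PySem.List.sorted s.toList (fun c => c) false
  let pairs := rle cs
  match PySem.List.min? (pairs.map (·.2)) (fun v => v) with
  | none => ""   -- min() over an empty generator raises ValueError in Python; excluded by Pre_solution
  | some m => String.ofList ((pairs.filter (fun p => p.2 == m)).map (·.1))

-- ===== PRECONDITION & SPEC =====
-- Pre_ excludes only the empty string, on which Python A raises ValueError (min of an empty dict).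
def Pre_solution (s : String) : Prop := s ≠ ""
instance (s : String) : Decidable (Pre_solution s) := by unfold Pre_solution; infer_instance

def pvWitness_solution : String := "aab"

def Spec_solution (s : String) (out : String) : Prop := out = solution_alt s
instance (s : String) (out : String) : Decidable (Spec_solution s out) := by unfold Spec_solution; infer_instance

-- ===== CLAIM (what is proved, stated in full; the proofs are below) =====
def Claim_equal_solution : Prop := ∀ (s : String), Dom_solution s → Pre_solution s → Spec_solution s (solution s)

-- ===== LEMMAS AND PROOFS =====

-- A's loop body is exactly Counter's update step
theorem stepA_eq_modify (d : PySem.Dict Char Int) (ch : Char) :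
    (if !(d.contains ch) then d.insert ch (1 : Int) else d.insert ch (d.getD ch 0 + 1))
      = d.modify ch 0 (· + 1) := by
  by_cases h : d.contains ch
  · simp [h, PySem.Dict.modify]
  · have hfind : List.find? (fun p => p.1 == ch) d.items = none := by
      simp only [PySem.Dict.contains] at h
      exact List.find?_eq_none.mpr (fun p hp hpc => h (List.any_eq_true.mpr ⟨p, hp, hpc⟩))
    have h0 : d.getD ch 0 = 0 := by
      simp [PySem.Dict.getD, PySem.Dict.get?, hfind]
    simp [h, PySem.Dict.modify, h0]

-- Python's min of an Int list depends only on the multiset of elements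
theorem min?_int_perm {xs ys : List Int} (h : xs.Perm ys) :
    PySem.List.min? xs (fun v => v) = PySem.List.min? ys (fun v => v) := by
  cases hx : PySem.List.min? xs (fun v => v) with
  | none =>
    rw [PySem.List.min?_eq_none_iff] at hx
    subst hx
    exact ((PySem.List.min?_eq_none_iff _ _).mpr h.symm.eq_nil).symm
  | some m =>
    cases hy : PySem.List.min? ys (fun v => v) with
    | none =>
      rw [PySem.List.min?_eq_none_iff] at hy
      subst hy
      rw [h.eq_nil, (PySem.List.min?_eq_none_iff _ _).mpr rfl] at hx
      exact absurd hx (by simp)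
    | some m' =>
      have hm := PySem.List.min?_mem hx
      have hm' := PySem.List.min?_mem hy
      have h1 : m ≤ m' := PySem.List.min?_isMin hx m' (h.symm.mem_iff.mp hm')
      have h2 : m' ≤ m := PySem.List.min?_isMin hy m (h.mem_iff.mp hm)
      exact congrArg some (le_antisymm h1 h2)

theorem rleRun_eq (c : Char) (k : Int) (rest : List Char) :
    rleRun c k rest
      = (k + ((rest.takeWhile (fun d => d == c)).length : Int),
         rest.dropWhile (fun d => d == c)) := by
  induction rest generalizing k with
  | nil => simp [rleRun]
  | cons d tl ih =>
    by_cases hd : d == c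
    · simp [rleRun, hd, ih]
      ring
    · simp [rleRun, hd]

-- run-length encoding of a sorted list: strictly increasing first components,
-- same members, and each pair carries the total count of its character
theorem rle_sorted_spec (l : List Char) (h : l.Pairwise (· ≤ ·)) :
    ((rle l).map (·.1)).Pairwise (· < ·)
    ∧ (∀ c : Char, c ∈ (rle l).map (·.1) ↔ c ∈ l)
    ∧ (∀ p ∈ rle l, p.2 = (l.count p.1 : Int)) := by
  induction l using rle.induct with
  | case1 => simp [rle]
  | case2 c tl r ih =>
    obtain ⟨hc, htl⟩ := List.pairwise_cons.mp h
    have hdecomp : tl.takeWhile (fun d => d == c) ++ tl.dropWhile (fun d => d == c) = tl :=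
      List.takeWhile_append_dropWhile
    have hdrpw : (tl.dropWhile (fun d => d == c)).Pairwise (· ≤ ·) :=
      List.Pairwise.sublist (List.dropWhile_sublist _) htl
    have htk : ∀ x ∈ tl.takeWhile (fun d => d == c), x = c := by
      intro x hx; simpa using List.mem_takeWhile_imp hx
    have hlt : ∀ x ∈ tl.dropWhile (fun d => d == c), c < x := by
      cases hdr : tl.dropWhile (fun d => d == c) with
      | nil => simp
      | cons d t =>
        have hpd : (d == c) = false := by
          have := List.head?_dropWhile_not (fun d => d == c) tl
          rw [hdr] at this; simpa using this
        have hdtl : d ∈ tl := (List.dropWhile_sublist _).mem (by rw [hdr]; exact List.mem_cons_self)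
        have hne : c ≠ d := by intro hcd; subst hcd; simp at hpd
        have hcd : c < d := lt_of_le_of_ne (hc d hdtl) hne
        intro x hx
        rcases List.mem_cons.mp hx with rfl | hxt
        · exact hcd
        · have hdx : d ≤ x := by
            have := hdrpw; rw [hdr] at this
            exact (List.pairwise_cons.mp this).1 x hxt
          exact lt_of_lt_of_le hcd hdx
    have hr2 : r.2 = tl.dropWhile (fun d => d == c) := by
      rw [show r = rleRun c 1 tl from rfl, rleRun_eq]
    rw [hr2] at ih
    obtain ⟨ihpw, ihmem, ihcnt⟩ := ih hdrpw
    have hrle : rle (c :: tl)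
        = (c, 1 + ((tl.takeWhile (fun d => d == c)).length : Int))
            :: rle (tl.dropWhile (fun d => d == c)) := by
      rw [rle, rleRun_eq]
    have hcnt_c : (c :: tl).count c = 1 + (tl.takeWhile (fun d => d == c)).length := by
      have h1 : (tl.takeWhile (fun d => d == c)).count c
          = (tl.takeWhile (fun d => d == c)).length :=
        List.count_eq_length.mpr (fun b hb => (htk b hb).symm)
      have h2 : (tl.dropWhile (fun d => d == c)).count c = 0 :=
        List.count_eq_zero.mpr (fun hmem => lt_irrefl c (hlt c hmem))
      calc (c :: tl).count c = tl.count c + 1 := List.count_cons_self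
        _ = ((tl.takeWhile (fun d => d == c)).count c
              + (tl.dropWhile (fun d => d == c)).count c) + 1 := by
            conv_lhs => rw [← hdecomp]
            rw [List.count_append]
        _ = 1 + (tl.takeWhile (fun d => d == c)).length := by rw [h1, h2]; omega
    have hcnt_other : ∀ x : Char, c < x → (c :: tl).count x = (tl.dropWhile (fun d => d == c)).count x := by
      intro x hx
      have hxc : x ≠ c := ne_of_gt hx
      have h1 : (tl.takeWhile (fun d => d == c)).count x = 0 :=
        List.count_eq_zero.mpr (fun hmem => hxc (htk x hmem))
      calc List.count x (c :: tl) = List.count x tl := by simp [Ne.symm hxc]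
        _ = List.count x (tl.takeWhile (fun d => d == c) ++ tl.dropWhile (fun d => d == c)) := by
            rw [hdecomp]
        _ = List.count x (tl.dropWhile (fun d => d == c)) := by
            rw [List.count_append, h1]; omega
    refine ⟨?_, ?_, ?_⟩
    · rw [hrle]
      simp only [List.map_cons, List.pairwise_cons]
      refine ⟨?_, ihpw⟩
      intro y hy
      exact hlt y ((ihmem y).mp hy)
    · intro x
      rw [hrle]
      simp only [List.map_cons, List.mem_cons, ihmem]
      constructor
      · rintro (rfl | hx)
        · exact Or.inl rfl
        · exact Or.inr ((List.dropWhile_sublist _).mem hx)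
      · intro hx
        rcases hx with rfl | hxtl
        · exact Or.inl rfl
        · rw [← hdecomp] at hxtl
          rcases List.mem_append.mp hxtl with h1 | h2
          · exact Or.inl (htk x h1)
          · exact Or.inr h2
    · intro p hp
      rw [hrle] at hp
      rcases List.mem_cons.mp hp with rfl | hp'
      · simp only []
        rw [hcnt_c]; push_cast; ring
      · have hmem : p.1 ∈ tl.dropWhile (fun d => d == c) :=
          (ihmem p.1).mp (List.mem_map.mpr ⟨p, hp', rfl⟩)
        rw [ihcnt p hp', hcnt_other p.1 (hlt p.1 hmem)]

-- ===== VERDICT (by name: the statement is the Claim_ definition above) =====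
theorem solution_spec : Claim_equal_solution := by
  intro s _ _
  unfold Spec_solution
  show solution s = solution_alt s
  simp only [solution, solution_alt]
  have hdic : s.toList.foldl (fun d ch =>
      if !(d.contains ch) then d.insert ch (1 : Int) else d.insert ch (d.getD ch 0 + 1))
      PySem.Dict.empty = PySem.Dict.counter s.toList := by
    rw [PySem.Dict.counter_eq_foldl]
    exact PySem.List.foldl_congr_mem _ _ _ _ (fun acc x _ => stepA_eq_modify acc x)
  rw [hdic]
  have hl : (PySem.List.sorted s.toList (fun c => c) false).Pairwise (· ≤ ·) :=
    PySem.List.sorted_pairwise s.toList (fun c => c)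
  obtain ⟨hpw, hmem, hcnt⟩ := rle_sorted_spec _ hl
  have hcount_eq : ∀ x : Char,
      (PySem.List.sorted s.toList (fun c => c) false).count x = s.toList.count x :=
    fun x => (PySem.List.sorted_perm s.toList (fun c => c) false).count_eq x
  have hDlnodup : ((rle (PySem.List.sorted s.toList (fun c => c) false)).map (·.1)).Nodup :=
    List.Pairwise.imp ne_of_lt hpw
  have hperm : (PySem.Set.ofList s.toList).Perm
      ((rle (PySem.List.sorted s.toList (fun c => c) false)).map (·.1)) :=
    (List.perm_ext_iff_of_nodup (PySem.Set.nodup_ofList s.toList) hDlnodup).mpr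
      (fun x => by rw [PySem.Set.mem_ofList, hmem x, PySem.List.mem_sorted])
  have hscrut : PySem.List.min? (PySem.Dict.counter s.toList).values (fun v => v)
      = PySem.List.min?
          ((rle (PySem.List.sorted s.toList (fun c => c) false)).map (·.2)) (fun v => v) := by
    have h1 : (PySem.Dict.counter s.toList).values
        = (PySem.Set.ofList s.toList).map (fun k => (s.toList.count k : Int)) := by
      simp only [PySem.Dict.values, PySem.Dict.items_counter, List.map_map]
      rfl
    have h2 : (rle (PySem.List.sorted s.toList (fun c => c) false)).map (·.2)
        = ((rle (PySem.List.sorted s.toList (fun c => c) false)).map (·.1)).map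
            (fun k => (s.toList.count k : Int)) := by
      rw [List.map_map]
      exact List.map_congr_left (fun p hp => by
        show p.2 = _
        rw [hcnt p hp, hcount_eq]
        rfl)
    rw [h1, h2]
    exact min?_int_perm (hperm.map _)
  rw [hscrut]
  cases hm : PySem.List.min?
      ((rle (PySem.List.sorted s.toList (fun c => c) false)).map (·.2)) (fun v => v) with
  | none => rfl
  | some m =>
    have hansA : ((PySem.Dict.counter s.toList).items.filter (fun p => p.2 == m)).map (·.1)
        = (PySem.Set.ofList s.toList).filter (fun k => ((s.toList.count k : Int) == m)) := by
      rw [PySem.Dict.items_counter, List.filter_map, List.map_map]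
      simp [Function.comp_def]
    have hLB : ((rle (PySem.List.sorted s.toList (fun c => c) false)).filter
          (fun p => p.2 == m)).map (·.1)
        = ((rle (PySem.List.sorted s.toList (fun c => c) false)).map (·.1)).filter
            (fun k => ((s.toList.count k : Int) == m)) := by
      conv_rhs => rw [List.filter_map]
      congr 1
      exact List.filter_congr (fun p hp => by
        show (p.2 == m) = _
        rw [hcnt p hp, hcount_eq]
        rfl)
    show String.ofList
        (PySem.List.sorted
          (((PySem.Dict.counter s.toList).items.filter (fun p => p.2 == m)).map (·.1)) (fun c => c))
      = String.ofList
          (((rle (PySem.List.sorted s.toList (fun c => c) false)).filter (fun p => p.2 == m)).map (·.1))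
    rw [hansA, hLB]
    refine congrArg String.ofList ?_
    exact PySem.List.sorted_eq_of_perm_of_pairwise_lt _ _ _
      ((hperm.filter _).symm) (List.Pairwise.filter _ hpw)
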